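-- pv_equiv track=rewrite | github.com/snagaraj0/Hi-C | scripts/spark.py | readcreation
-- ===== SOURCE A (Python) =====
-- def readcreation(reads):
--     temp = 0
--     line = ""
--     line1 = ""
--     line2 = ""
--     line3 = ""
--     for read in reads:
--         if  temp == 0:
--             line = read
--         elif temp == 1:
--             line1 = read
--         elif temp == 2:
--             line2 = read
--         else:
--             line3 = read
--         temp = temp+1
--     return "%s\n%s\n%s\n%s\n"  % (line, line1, line2, line3)
-- ===== SOURCE B (Python) =====
-- def readcreation(reads):
--     items = list(reads)
--     n = len(items)
--     line = items[0] if n > 0 else ""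
--     line1 = items[1] if n > 1 else ""
--     line2 = items[2] if n > 2 else ""
--     line3 = items[-1] if n > 3 else ""
--     return "%s\n%s\n%s\n%s\n" % (line, line1, line2, line3)
-- ===== Notes on version B (the rewrite author's own statement) =====
-- stated objective: simpler
-- what changed: Replaced the counter-driven state machine (temp plus a four-way branch ladder updated per element) with direct positional indexing: first three elements guarded by length, and the last element when the list has more than three items.
import Mathlib
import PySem

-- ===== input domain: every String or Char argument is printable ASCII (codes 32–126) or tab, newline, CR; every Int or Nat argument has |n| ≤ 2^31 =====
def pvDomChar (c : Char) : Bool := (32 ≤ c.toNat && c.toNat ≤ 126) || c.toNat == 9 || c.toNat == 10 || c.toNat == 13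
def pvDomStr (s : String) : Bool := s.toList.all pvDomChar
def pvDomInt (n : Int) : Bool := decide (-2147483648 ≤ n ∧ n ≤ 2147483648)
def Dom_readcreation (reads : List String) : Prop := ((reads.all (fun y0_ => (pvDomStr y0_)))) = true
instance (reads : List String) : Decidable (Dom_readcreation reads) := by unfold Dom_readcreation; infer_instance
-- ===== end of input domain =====

-- B replaces A's counter-driven state machine with length-guarded positional indexing (objective: simpler).

-- ===== PORT A =====
-- state: (temp, line, line1, line2, line3), updated per element exactly as A's loop body does
def readStep (st : Int × String × String × String × String) (read : String) :
    Int × String × String × String × String :=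
  let (temp, l, l1, l2, l3) := st
  if temp = 0 then (temp + 1, read, l1, l2, l3)
  else if temp = 1 then (temp + 1, l, read, l2, l3)
  else if temp = 2 then (temp + 1, l, l1, read, l3)
  else (temp + 1, l, l1, l2, read)

def readcreation (reads : List String) : String :=
  let s := reads.foldl readStep (0, "", "", "", "")
  s.2.1 ++ "\n" ++ s.2.2.1 ++ "\n" ++ s.2.2.2.1 ++ "\n" ++ s.2.2.2.2 ++ "\n"

-- ===== PORT B =====
def readcreation_alt (reads : List String) : String :=
  let n : Int := reads.length
  let line := if n > 0 then (PySem.List.pyGet? reads 0).getD "" else ""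
  let line1 := if n > 1 then (PySem.List.pyGet? reads 1).getD "" else ""
  let line2 := if n > 2 then (PySem.List.pyGet? reads 2).getD "" else ""
  let line3 := if n > 3 then (PySem.List.pyGet? reads (-1)).getD "" else ""
  line ++ "\n" ++ line1 ++ "\n" ++ line2 ++ "\n" ++ line3 ++ "\n"

-- ===== PRECONDITION & SPEC =====
def Spec_readcreation (reads : List String) (out : String) : Prop := out = readcreation_alt reads
instance (reads : List String) (out : String) : Decidable (Spec_readcreation reads out) := by unfold Spec_readcreation; infer_instance

-- ===== CLAIM (what is proved, stated in full; the proofs are below) =====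
def Claim_equal_readcreation : Prop := ∀ (reads : List String), Dom_readcreation reads → Spec_readcreation reads (readcreation reads)

-- ===== LEMMAS AND PROOFS =====

-- once temp ≥ 3, A's loop only keeps overwriting line3 with each element
lemma foldA_ge_three (rest : List String) (t : Int) (a b c x : String) (ht : 3 ≤ t) :
    rest.foldl readStep (t, a, b, c, x)
    = (t + rest.length, a, b, c, rest.getLastD x) := by
  induction rest generalizing t x with
  | nil => simp
  | cons y ys ih =>
    have h0 : ¬ t = 0 := by omega
    have h1 : ¬ t = 1 := by omega
    have h2 : ¬ t = 2 := by omega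
    simp only [List.foldl_cons, readStep, h0, h1, h2, if_false]
    rw [ih (t + 1) y (by omega)]
    simp only [List.length_cons, List.getLastD_cons]
    congr 1
    push_cast
    ring

-- Python items[-1] on a nonempty list is its last element
lemma pyGet_neg_one (y : String) (ys : List String) :
    (PySem.List.pyGet? (y :: ys) (-1)).getD "" = (y :: ys).getLastD "" := by
  simp [PySem.List.pyGet?, PySem.List.pyIdx?, List.getLastD_eq_getLast?,
    List.getLast?_eq_getElem?]

-- ===== VERDICT (by name: the statement is the Claim_ definition above) =====
theorem readcreation_spec : Claim_equal_readcreation := by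
  intro reads _
  unfold Spec_readcreation readcreation readcreation_alt
  match reads with
  | [] => rfl
  | [a] => rfl
  | [a, b] => rfl
  | [a, b, c] => rfl
  | a :: b :: c :: y :: ys =>
    simp only [List.foldl_cons]
    have hinit : readStep (readStep (readStep (readStep (0, "", "", "", "") a) b) c) y
        = (4, a, b, c, y) := rfl
    rw [hinit, foldA_ge_three ys 4 a b c y (by omega)]
    rw [pyGet_neg_one a (b :: c :: y :: ys)]
    have h0 : ((0:Int) ≤ (ys.length : Int) + 1 + 1 + 1) := by positivity
    have h1 : ((0:Int) ≤ (ys.length : Int) + 1 + 1) := by positivity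
    have h2 : ((2:Int) ≤ (ys.length : Int) + 1 + 1 + 1) := by omega
    have h3 : ((3:Int) ≤ (ys.length : Int) + 1 + 1 + 1) := by omega
    simp [h0, h1, h2, h3, PySem.List.pyGet?, PySem.List.pyIdx?]
    cases ys with
    | nil => rfl
    | cons z zs =>
      rw [List.getLast?_cons_cons]
      cases h : (z :: zs).getLast? with
      | none => simp [List.getLast?_eq_none_iff] at h
      | some v => simp
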